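-- pv_equiv track=rewrite | github.com/lorenzo2505-font/ITS-Esercizi | ripasso/somma_matrice.py | sum_secondary_diagonal
-- ===== SOURCE A (Python) =====
-- def sum_secondary_diagonal(mylist: list[list[int]]) -> int:
--
--     somma = 0
--
--     x = -1
--
--
--     for i in range(len(mylist)):
--
--         if len(mylist[i]) != len(mylist):
--
--             raise Exception("la matrice deve essere di dimensioni n X n")
--
--         somma += mylist[i][x]
--
--         x -= 1
--
--     return somma
-- ===== SOURCE B (Python) =====
-- def sum_secondary_diagonal(mylist: list[list[int]]) -> int:
--     n = len(mylist)
--     for row in mylist: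
--         if len(row) != n:
--             raise Exception("la matrice deve essere di dimensioni n X n")
--
--     def go(m):
--         if not m:
--             return 0
--         # secondary diagonal of m = last of first row + secondary diagonal of
--         # the submatrix without the first row and the last column
--         return m[0][-1] + go([row[:-1] for row in m[1:]])
--
--     return go(mylist)
-- ===== Notes on version B (the rewrite author's own statement) =====
-- stated objective: alternative
-- what changed: B validates squareness in a separate pass and then computes the sum by structural recursion that peels the first row and drops the last column of each remaining row, recursing on an (n-1)x(n-1) submatrix, instead of A's single indexed loop with a decrementing negative index; B trades A's O(n) diagonal walk for quadratic submatrix building.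
import Mathlib
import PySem

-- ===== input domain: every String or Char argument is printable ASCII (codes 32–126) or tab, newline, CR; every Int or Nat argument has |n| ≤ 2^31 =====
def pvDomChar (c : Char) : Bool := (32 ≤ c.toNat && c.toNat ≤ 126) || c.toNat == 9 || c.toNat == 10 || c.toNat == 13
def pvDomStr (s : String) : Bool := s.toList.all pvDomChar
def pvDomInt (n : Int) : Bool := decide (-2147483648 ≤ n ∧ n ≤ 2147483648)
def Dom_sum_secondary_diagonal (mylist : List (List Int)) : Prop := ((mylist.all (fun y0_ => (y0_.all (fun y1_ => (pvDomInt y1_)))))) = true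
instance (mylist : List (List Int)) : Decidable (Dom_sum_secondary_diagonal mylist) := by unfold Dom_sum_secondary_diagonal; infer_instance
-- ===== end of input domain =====

-- B replaces A's single indexed loop (negative index x decrementing) by a validation pass
-- followed by structural recursion: peel the first row's last element and recurse on the
-- submatrix without the first row and last column. Equivalence is on the return value;
-- both raise the same Exception on non-square input (excluded by Pre_).

-- ===== PORT A =====
-- state = (somma, x); the non-square branch raises in Python (excluded by Pre_), the port keeps the state
def sum_secondary_diagonal (mylist : List (List Int)) : Int :=
  ((PySem.List.pyRange 0 (mylist.length : Int) 1).foldl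
    (fun (st : Int × Int) i =>
      if (PySem.List.pyGetD mylist i []).length ≠ mylist.length then st
      else (st.1 + PySem.List.pyGetD (PySem.List.pyGetD mylist i []) st.2 0, st.2 - 1))
    (0, -1)).1

-- ===== PORT B =====
-- Source B's inner 'go': m[0][-1] + go of [row[:-1] for row in m[1:]]
def pvGo : List (List Int) → Int
  | [] => 0
  | r :: rest =>
      PySem.List.pyGetD r (-1) 0 +
        pvGo (rest.map (fun row => PySem.List.slice row none (some (-1))))
termination_by m => m.length
decreasing_by simp

-- the raise in B's validation pass (excluded by Pre_) is rendered as returning 0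
def sum_secondary_diagonal_alt (mylist : List (List Int)) : Int :=
  if mylist.any (fun row => row.length ≠ mylist.length) then 0
  else pvGo mylist

-- ===== PRECONDITION & SPEC =====
-- exactly the inputs where A returns: on any non-square row both programs raise Exception
def Pre_sum_secondary_diagonal (mylist : List (List Int)) : Prop :=
  ∀ row ∈ mylist, row.length = mylist.length

instance (mylist : List (List Int)) : Decidable (Pre_sum_secondary_diagonal mylist) := by
  unfold Pre_sum_secondary_diagonal; infer_instance

def pvWitness_sum_secondary_diagonal : List (List Int) := [[1, 2], [3, 4]]

def Spec_sum_secondary_diagonal (mylist : List (List Int)) (out : Int) : Prop := out = sum_secondary_diagonal_alt mylist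
instance (mylist : List (List Int)) (out : Int) : Decidable (Spec_sum_secondary_diagonal mylist out) := by unfold Spec_sum_secondary_diagonal; infer_instance

-- ===== CLAIM (what is proved, stated in full; the proofs are below) =====
def Claim_equal_sum_secondary_diagonal : Prop := ∀ (mylist : List (List Int)), Dom_sum_secondary_diagonal mylist → Pre_sum_secondary_diagonal mylist → Spec_sum_secondary_diagonal mylist (sum_secondary_diagonal mylist)

-- ===== LEMMAS AND PROOFS =====

-- common characterisation: the sum of m[i][m.length-1-i]
def pvS (m : List (List Int)) : Int :=
  ∑ i ∈ Finset.range m.length, (m.getD i []).getD (m.length - 1 - i) 0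

theorem pvA_key (n : Nat) : ∀ (rows : List (List Int)) (k : Nat) (s : Int),
    (∀ row ∈ rows, row.length = n) → k + rows.length = n →
    (rows.foldl
      (fun (st : Int × Int) row =>
        if row.length ≠ n then st
        else (st.1 + PySem.List.pyGetD row st.2 0, st.2 - 1))
      (s, -1 - (k : Int))).1
    = s + ∑ i ∈ Finset.range rows.length, ((rows.getD i []).getD (n - 1 - (k + i)) 0) := by
  intro rows
  induction rows with
  | nil => intro k s _ _; simp
  | cons row rest ih =>
    intro k s hlen hk
    have hrow : row.length = n := hlen row (List.mem_cons_self ..)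
    have hk1 : k < n := by simp at hk; omega
    have hidx : PySem.List.pyGetD row (-1 - (k : Int)) 0 = row.getD (n - 1 - k) 0 := by
      have h1 : (-1 - (k : Int)) = -(((k + 1 : Nat)) : Int) := by push_cast; ring
      have h2 : PySem.List.pyGetD row (-(((k + 1 : Nat)) : Int)) 0 = row[row.length - (k + 1)] :=
        PySem.List.pyGetD_neg_natCast row (k + 1) 0 (by omega) (by omega)
      rw [h1, h2, List.getD_eq_getElem row 0 (by omega)]
      congr 1
      omega
    rw [List.foldl_cons]
    simp only [hrow, ne_eq, not_true_eq_false, if_false]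
    have hstep : (-1 - (k : Int)) - 1 = -1 - ((k + 1 : Nat) : Int) := by push_cast; ring
    rw [hstep, ih (k + 1) (s + PySem.List.pyGetD row (-1 - (k : Int)) 0)
      (fun r hr => hlen r (List.mem_cons_of_mem _ hr)) (by simp at hk ⊢; omega)]
    rw [hidx]
    rw [List.length_cons, Finset.sum_range_succ']
    simp only [List.getD_cons_zero, List.getD_cons_succ]
    have : ∀ i, (rest.getD i []).getD (n - 1 - (k + (i + 1))) 0
            = (rest.getD i []).getD (n - 1 - (k + 1 + i)) 0 := by
      intro i; congr 1; omega
    simp only [this]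
    simp only [Nat.add_zero]
    ring

theorem pvGo_eq (N : Nat) : ∀ (m : List (List Int)), m.length ≤ N →
    (∀ row ∈ m, row.length = m.length) → pvGo m = pvS m := by
  induction N with
  | zero =>
    intro m hN _
    have : m = [] := List.eq_nil_of_length_eq_zero (by omega)
    subst this; simp [pvGo, pvS]
  | succ N ih =>
    intro m hN hsq
    match m with
    | [] => simp [pvGo, pvS]
    | r :: rest =>
      have hr : r.length = rest.length + 1 := by
        simpa using hsq r (List.mem_cons_self ..)
      rw [pvGo]
      simp only [PySem.List.slice_to_neg_one]
      set sub := rest.map (fun row => row.dropLast) with hsub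
      have hsublen : sub.length = rest.length := by simp [hsub]
      have hN' : rest.length ≤ N := by simpa using hN
      have hsubsq : ∀ row ∈ sub, row.length = sub.length := by
        intro row hrow
        rw [hsub] at hrow
        obtain ⟨row', hrow', rfl⟩ := List.mem_map.mp hrow
        have : row'.length = rest.length + 1 := by
          simpa using hsq row' (List.mem_cons_of_mem _ hrow')
        simp [hsublen, this]
      rw [ih sub (by rw [hsublen]; exact hN') hsubsq]
      -- first element: r[-1] = r.getD (rest.length) 0
      have hrne : r ≠ [] := List.ne_nil_of_length_pos (by omega)
      have hfirst : PySem.List.pyGetD r (-1) 0 = r.getD rest.length 0 := by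
        rw [PySem.List.pyGetD_neg_ofNat r 1 0 (by omega) (by omega),
            List.getD_eq_getElem r 0 (by omega)]
        congr 1
        omega
      -- sums
      unfold pvS
      rw [List.length_cons, Finset.sum_range_succ']
      simp only [List.getD_cons_zero, List.getD_cons_succ, hsublen]
      rw [hfirst]
      have hterm : ∀ i ∈ Finset.range rest.length,
          (sub.getD i []).getD (rest.length - 1 - i) 0
          = (rest.getD i []).getD (rest.length + 1 - 1 - (i + 1)) 0 := by
        intro i hi
        rw [Finset.mem_range] at hi
        have hmem : rest.getD i [] ∈ rest := by
          rw [List.getD_eq_getElem _ _ hi]; exact List.getElem_mem _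
        have hrowlen : (rest.getD i []).length = rest.length + 1 := by
          simpa using hsq (rest.getD i []) (List.mem_cons_of_mem _ hmem)
        have hsubget : sub.getD i [] = (rest.getD i []).dropLast := by
          rw [hsub, List.getD_eq_getElem _ _ (by simpa using hi),
              List.getElem_map, List.getD_eq_getElem _ _ hi]
        rw [hsubget]
        rw [List.getD_eq_getElem ((rest.getD i []).dropLast) 0
              (by rw [List.length_dropLast, hrowlen]; omega),
            List.getD_eq_getElem (rest.getD i []) 0 (by rw [hrowlen]; omega),
            List.getElem_dropLast]
        congr 1
        omega
      rw [Finset.sum_congr rfl hterm, add_comm]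
      congr 2

-- ===== VERDICT (by name: the statement is the Claim_ definition above) =====
theorem sum_secondary_diagonal_spec : Claim_equal_sum_secondary_diagonal := by
  intro mylist _ hpre
  unfold Spec_sum_secondary_diagonal sum_secondary_diagonal sum_secondary_diagonal_alt
  have hany : mylist.any (fun row => row.length ≠ mylist.length) = false := by
    simp only [List.any_eq_false, decide_eq_true_eq]
    intro row hr
    simp [hpre row hr]
  rw [if_neg (by simp only [hany]; exact Bool.false_ne_true)]
  rw [PySem.List.foldl_pyRange_zero_pyGetD' mylist ([] : List Int)
    (fun (st : Int × Int) row =>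
      if row.length ≠ mylist.length then st
      else (st.1 + PySem.List.pyGetD row st.2 0, st.2 - 1)) (0, -1)]
  have hA := pvA_key mylist.length mylist 0 0 (fun r hr => hpre r hr) (by simp)
  have hB := pvGo_eq mylist.length mylist le_rfl hpre
  have h0 : (-1 : Int) = -1 - ((0 : Nat) : Int) := by norm_num
  rw [h0, hA, hB]
  simp [pvS]
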